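-- pv_equiv track=rewrite | github.com/GeniaBoeing/AdventOfCode2021 | day19.py | rotate_beacons
-- ===== SOURCE A (Python) =====
-- def sign(i):
--     if i >= 0:
--         return 1
--     else:
--         return -1
--
-- rotation_vectors = [[1, 2, 3],
--                     [1, -3, 2],
--                     [1, -2, -3],
--                     [1, 3, -2],
--                     [-1, 2, -3],
--                     [-1, 3, 2],
--                     [-1, -2, 3],
--                     [-1, -3, -2],
--                     [2, -1, 3],
--                     [2, 1, -3],
--                     [2, 3, 1],
--                     [2, -3, -1],
--                     [-2, -3, 1],
--                     [-2, 3, -1],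
--                     [-2, 1, 3],
--                     [-2, -1, -3],
--                     [3, 2, -1],
--                     [3, -2, 1],
--                     [3, 1, 2],
--                     [3, -1, -2],
--                     [-3, 2, 1],
--                     [-3, 1, -2],
--                     [-3, -1, 2],
--                     [-3, -2, -1]]
--
-- def rotate_beacons(scanner):
--     all_rotations = []
--     for rot in rotation_vectors:
--         rot_scanner = []
--         for beacon in scanner:
--            rot_scanner.append([beacon[abs(rot[i])-1]*sign(rot[i]) for i in range(len(rot))])
--         all_rotations.append(rot_scanner)
--     return all_rotations
-- ===== SOURCE B (Python) =====
-- # Matrix-vector form: each of the 24 orientations is a hardcoded signed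
-- # permutation matrix; a beacon is rotated by three integer dot products.
-- ROTATION_MATRICES = [
--     [[1, 0, 0], [0, 1, 0], [0, 0, 1]],
--     [[1, 0, 0], [0, 0, -1], [0, 1, 0]],
--     [[1, 0, 0], [0, -1, 0], [0, 0, -1]],
--     [[1, 0, 0], [0, 0, 1], [0, -1, 0]],
--     [[-1, 0, 0], [0, 1, 0], [0, 0, -1]],
--     [[-1, 0, 0], [0, 0, 1], [0, 1, 0]],
--     [[-1, 0, 0], [0, -1, 0], [0, 0, 1]],
--     [[-1, 0, 0], [0, 0, -1], [0, -1, 0]],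
--     [[0, 1, 0], [-1, 0, 0], [0, 0, 1]],
--     [[0, 1, 0], [1, 0, 0], [0, 0, -1]],
--     [[0, 1, 0], [0, 0, 1], [1, 0, 0]],
--     [[0, 1, 0], [0, 0, -1], [-1, 0, 0]],
--     [[0, -1, 0], [0, 0, -1], [1, 0, 0]],
--     [[0, -1, 0], [0, 0, 1], [-1, 0, 0]],
--     [[0, -1, 0], [1, 0, 0], [0, 0, 1]],
--     [[0, -1, 0], [-1, 0, 0], [0, 0, -1]],
--     [[0, 0, 1], [0, 1, 0], [-1, 0, 0]],
--     [[0, 0, 1], [0, -1, 0], [1, 0, 0]],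
--     [[0, 0, 1], [1, 0, 0], [0, 1, 0]],
--     [[0, 0, 1], [-1, 0, 0], [0, -1, 0]],
--     [[0, 0, -1], [0, 1, 0], [1, 0, 0]],
--     [[0, 0, -1], [1, 0, 0], [0, -1, 0]],
--     [[0, 0, -1], [-1, 0, 0], [0, 1, 0]],
--     [[0, 0, -1], [0, -1, 0], [-1, 0, 0]],
-- ]
--
-- def rotate_beacons(scanner):
--     return [[[sum(row[j] * beacon[j] for j in range(3)) for row in m]
--              for beacon in scanner]
--             for m in ROTATION_MATRICES]
-- ===== Notes on version B (the rewrite author's own statement) =====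
-- stated objective: alternative
-- what changed: Replaces the abs/sign index-select over rotation vectors with 24 hardcoded signed permutation matrices applied to each beacon by integer matrix-vector dot products.
import Mathlib
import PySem

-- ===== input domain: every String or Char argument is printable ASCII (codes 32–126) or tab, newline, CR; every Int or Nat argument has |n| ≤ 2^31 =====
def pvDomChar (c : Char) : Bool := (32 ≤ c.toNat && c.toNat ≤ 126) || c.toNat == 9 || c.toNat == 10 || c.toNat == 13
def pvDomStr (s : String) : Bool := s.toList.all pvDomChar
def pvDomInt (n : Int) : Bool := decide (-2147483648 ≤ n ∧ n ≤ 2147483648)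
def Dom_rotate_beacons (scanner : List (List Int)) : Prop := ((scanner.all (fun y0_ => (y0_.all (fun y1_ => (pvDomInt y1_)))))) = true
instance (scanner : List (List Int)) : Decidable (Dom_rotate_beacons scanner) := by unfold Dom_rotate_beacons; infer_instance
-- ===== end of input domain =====

-- B replaces A's abs/sign index-select over rotation vectors with 24 hardcoded signed
-- permutation matrices applied by integer matrix-vector dot products (objective: alternative).

-- ===== PORT A =====
def pySign (i : Int) : Int := if i ≥ 0 then 1 else -1

def rotation_vectors : List (List Int) :=
  [[(1 : Int), (2 : Int), (3 : Int)],
   [(1 : Int), (-3 : Int), (2 : Int)],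
   [(1 : Int), (-2 : Int), (-3 : Int)],
   [(1 : Int), (3 : Int), (-2 : Int)],
   [(-1 : Int), (2 : Int), (-3 : Int)],
   [(-1 : Int), (3 : Int), (2 : Int)],
   [(-1 : Int), (-2 : Int), (3 : Int)],
   [(-1 : Int), (-3 : Int), (-2 : Int)],
   [(2 : Int), (-1 : Int), (3 : Int)],
   [(2 : Int), (1 : Int), (-3 : Int)],
   [(2 : Int), (3 : Int), (1 : Int)],
   [(2 : Int), (-3 : Int), (-1 : Int)],
   [(-2 : Int), (-3 : Int), (1 : Int)],
   [(-2 : Int), (3 : Int), (-1 : Int)],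
   [(-2 : Int), (1 : Int), (3 : Int)],
   [(-2 : Int), (-1 : Int), (-3 : Int)],
   [(3 : Int), (2 : Int), (-1 : Int)],
   [(3 : Int), (-2 : Int), (1 : Int)],
   [(3 : Int), (1 : Int), (2 : Int)],
   [(3 : Int), (-1 : Int), (-2 : Int)],
   [(-3 : Int), (2 : Int), (1 : Int)],
   [(-3 : Int), (1 : Int), (-2 : Int)],
   [(-3 : Int), (-1 : Int), (2 : Int)],
   [(-3 : Int), (-2 : Int), (-1 : Int)]]

def rotate_beacons (scanner : List (List Int)) : List (List (List Int)) :=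
  rotation_vectors.foldl (fun all_rotations rot =>
    all_rotations ++
      [scanner.foldl (fun rot_scanner beacon =>
        rot_scanner ++
          [(PySem.List.pyRange 0 (PySem.List.len rot) 1).map (fun i =>
            PySem.List.pyGetD beacon (|PySem.List.pyGetD rot i 0| - 1) 0
              * pySign (PySem.List.pyGetD rot i 0))]) []]) []

-- ===== PORT B =====
def rotation_matrices : List (List (List Int)) :=
  [[[(1 : Int), (0 : Int), (0 : Int)], [(0 : Int), (1 : Int), (0 : Int)], [(0 : Int), (0 : Int), (1 : Int)]],
   [[(1 : Int), (0 : Int), (0 : Int)], [(0 : Int), (0 : Int), (-1 : Int)], [(0 : Int), (1 : Int), (0 : Int)]],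
   [[(1 : Int), (0 : Int), (0 : Int)], [(0 : Int), (-1 : Int), (0 : Int)], [(0 : Int), (0 : Int), (-1 : Int)]],
   [[(1 : Int), (0 : Int), (0 : Int)], [(0 : Int), (0 : Int), (1 : Int)], [(0 : Int), (-1 : Int), (0 : Int)]],
   [[(-1 : Int), (0 : Int), (0 : Int)], [(0 : Int), (1 : Int), (0 : Int)], [(0 : Int), (0 : Int), (-1 : Int)]],
   [[(-1 : Int), (0 : Int), (0 : Int)], [(0 : Int), (0 : Int), (1 : Int)], [(0 : Int), (1 : Int), (0 : Int)]],
   [[(-1 : Int), (0 : Int), (0 : Int)], [(0 : Int), (-1 : Int), (0 : Int)], [(0 : Int), (0 : Int), (1 : Int)]],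
   [[(-1 : Int), (0 : Int), (0 : Int)], [(0 : Int), (0 : Int), (-1 : Int)], [(0 : Int), (-1 : Int), (0 : Int)]],
   [[(0 : Int), (1 : Int), (0 : Int)], [(-1 : Int), (0 : Int), (0 : Int)], [(0 : Int), (0 : Int), (1 : Int)]],
   [[(0 : Int), (1 : Int), (0 : Int)], [(1 : Int), (0 : Int), (0 : Int)], [(0 : Int), (0 : Int), (-1 : Int)]],
   [[(0 : Int), (1 : Int), (0 : Int)], [(0 : Int), (0 : Int), (1 : Int)], [(1 : Int), (0 : Int), (0 : Int)]],
   [[(0 : Int), (1 : Int), (0 : Int)], [(0 : Int), (0 : Int), (-1 : Int)], [(-1 : Int), (0 : Int), (0 : Int)]],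
   [[(0 : Int), (-1 : Int), (0 : Int)], [(0 : Int), (0 : Int), (-1 : Int)], [(1 : Int), (0 : Int), (0 : Int)]],
   [[(0 : Int), (-1 : Int), (0 : Int)], [(0 : Int), (0 : Int), (1 : Int)], [(-1 : Int), (0 : Int), (0 : Int)]],
   [[(0 : Int), (-1 : Int), (0 : Int)], [(1 : Int), (0 : Int), (0 : Int)], [(0 : Int), (0 : Int), (1 : Int)]],
   [[(0 : Int), (-1 : Int), (0 : Int)], [(-1 : Int), (0 : Int), (0 : Int)], [(0 : Int), (0 : Int), (-1 : Int)]],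
   [[(0 : Int), (0 : Int), (1 : Int)], [(0 : Int), (1 : Int), (0 : Int)], [(-1 : Int), (0 : Int), (0 : Int)]],
   [[(0 : Int), (0 : Int), (1 : Int)], [(0 : Int), (-1 : Int), (0 : Int)], [(1 : Int), (0 : Int), (0 : Int)]],
   [[(0 : Int), (0 : Int), (1 : Int)], [(1 : Int), (0 : Int), (0 : Int)], [(0 : Int), (1 : Int), (0 : Int)]],
   [[(0 : Int), (0 : Int), (1 : Int)], [(-1 : Int), (0 : Int), (0 : Int)], [(0 : Int), (-1 : Int), (0 : Int)]],
   [[(0 : Int), (0 : Int), (-1 : Int)], [(0 : Int), (1 : Int), (0 : Int)], [(1 : Int), (0 : Int), (0 : Int)]],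
   [[(0 : Int), (0 : Int), (-1 : Int)], [(1 : Int), (0 : Int), (0 : Int)], [(0 : Int), (-1 : Int), (0 : Int)]],
   [[(0 : Int), (0 : Int), (-1 : Int)], [(-1 : Int), (0 : Int), (0 : Int)], [(0 : Int), (1 : Int), (0 : Int)]],
   [[(0 : Int), (0 : Int), (-1 : Int)], [(0 : Int), (-1 : Int), (0 : Int)], [(-1 : Int), (0 : Int), (0 : Int)]]]

def rotate_beacons_alt (scanner : List (List Int)) : List (List (List Int)) :=
  rotation_matrices.map (fun m =>
    scanner.map (fun beacon =>
      m.map (fun row =>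
        ((PySem.List.pyRange 0 3 1).map (fun j =>
          PySem.List.pyGetD row j 0 * PySem.List.pyGetD beacon j 0)).sum)))

-- ===== PRECONDITION & SPEC =====
-- Pre_ excludes scanners containing a beacon with fewer than 3 coordinates: there both
-- A and B raise IndexError (beacon[2] out of range), so no value is claimed.
def Pre_rotate_beacons (scanner : List (List Int)) : Prop :=
  ∀ b ∈ scanner, 3 ≤ b.length
instance (scanner : List (List Int)) : Decidable (Pre_rotate_beacons scanner) := by
  unfold Pre_rotate_beacons; infer_instance

def pvWitness_rotate_beacons : List (List Int) := [[1, 2, 3], [-4, 5, 0]]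

def Spec_rotate_beacons (scanner : List (List Int)) (out : List (List (List Int))) : Prop := out = rotate_beacons_alt scanner
instance (scanner : List (List Int)) (out : List (List (List Int))) : Decidable (Spec_rotate_beacons scanner out) := by unfold Spec_rotate_beacons; infer_instance

-- ===== CLAIM (what is proved, stated in full; the proofs are below) =====
def Claim_equal_rotate_beacons : Prop := ∀ (scanner : List (List Int)), Dom_rotate_beacons scanner → Pre_rotate_beacons scanner → Spec_rotate_beacons scanner (rotate_beacons scanner)

-- ===== LEMMAS AND PROOFS =====

-- A's index comprehension 'for i in range(len(rot))' read back as a map over rot itself.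
lemma A_inner (rot b : List Int) :
    (PySem.List.pyRange 0 (PySem.List.len rot) 1).map
      (fun i => PySem.List.pyGetD b (|PySem.List.pyGetD rot i 0| - 1) 0
        * pySign (PySem.List.pyGetD rot i 0))
    = rot.map (fun r => PySem.List.pyGetD b (|r| - 1) 0 * pySign r) := by
  conv_rhs => rw [← PySem.List.map_pyGetD_pyRange_zero (xs := rot) (d := (0 : Int))]
  rw [List.map_map]
  rfl

lemma pyGetD_one_cons {α : Type} (x y : α) (l : List α) (d : α) :
    PySem.List.pyGetD (x :: y :: l) 1 d = y := by
  simp [PySem.List.pyGetD, PySem.List.pyGet?, PySem.List.pyIdx?]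

lemma pyGetD_two_cons {α : Type} (x y z : α) (l : List α) (d : α) :
    PySem.List.pyGetD (x :: y :: z :: l) 2 d = z := by
  have h : (2 : Int) ≤ (l.length : Int) + 1 + 1 := by omega
  simp [PySem.List.pyGetD, PySem.List.pyGet?, PySem.List.pyIdx?, h]

-- B's dot product against a literal 3-row, written out.
lemma B_dot (a1 a2 a3 : Int) (b : List Int) :
    ((PySem.List.pyRange 0 3 1).map (fun j =>
      PySem.List.pyGetD [a1, a2, a3] j 0 * PySem.List.pyGetD b j 0)).sum
    = a1 * PySem.List.pyGetD b 0 0 + a2 * PySem.List.pyGetD b 1 0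
        + a3 * PySem.List.pyGetD b 2 0 := by
  have h : PySem.List.pyRange 0 3 1 = [0, 1, 2] := by decide
  rw [h]
  simp [PySem.List.pyGetD_zero_cons, pyGetD_one_cons, pyGetD_two_cons]
  ring

-- ===== VERDICT (by name: the statement is the Claim_ definition above) =====
theorem rotate_beacons_spec : Claim_equal_rotate_beacons := by
  intro scanner hdom hpre
  unfold Spec_rotate_beacons
  simp only [rotate_beacons, rotate_beacons_alt, rotation_vectors, rotation_matrices,
    PySem.List.foldl_append_singleton_eq_map, List.map, List.nil_append]
  simp only [List.cons.injEq]
  refine ⟨?_, ?_, ?_, ?_, ?_, ?_, ?_, ?_, ?_, ?_, ?_, ?_, ?_, ?_, ?_, ?_, ?_, ?_, ?_, ?_, ?_, ?_, ?_, ?_, trivial⟩ <;>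
  · apply List.map_congr_left
    intro b hb
    have h3 := hpre b hb
    match b, h3 with
    | x :: y :: z :: rest, _ =>
      rw [A_inner]
      simp only [List.map, B_dot]
      norm_num [pySign, PySem.List.pyGetD_zero_cons, pyGetD_one_cons, pyGetD_two_cons]
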